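-- pv_equiv track=rewrite | github.com/schimmmi/n8n-workflow-builder | src/n8n_workflow_builder/templates/intent_extractor.py | _extract_assumptions
-- ===== SOURCE A (Python) =====
-- from typing import Dict, List, Optional
--
-- def _extract_assumptions(nodes: List[Dict]) -> List[str]:
--     """Extract implicit assumptions"""
--     assumptions = []
--
--     node_types = [node.get("type", "").lower() for node in nodes]
--
--     # API assumptions
--     if any("http" in nt or "api" in nt for nt in node_types):
--         assumptions.append("External API is available and stable")
--         assumptions.append("API authentication credentials are valid")
--
--     # Database assumptions
--     if any("database" in nt or "postgres" in nt or "mysql" in nt for nt in node_types):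
--         assumptions.append("Database connection is stable")
--         assumptions.append("Database schema matches expected structure")
--
--     # Schedule assumptions
--     if any("schedule" in nt for nt in node_types):
--         assumptions.append("Workflow executes within expected time window")
--
--     # Webhook assumptions
--     if any("webhook" in nt for nt in node_types):
--         assumptions.append("Webhook endpoint is publicly accessible")
--         assumptions.append("Webhook payload format is consistent")
--
--     # Data assumptions
--     if len(nodes) > 5:
--         assumptions.append("Input data format is consistent")
--         assumptions.append("Data volume is manageable")
--
--     # Check for error handling
--     has_error_handling = any(
--         "error" in node.get("type", "").lower() or
--         node.get("continueOnFail", False)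
--         for node in nodes
--     )
--
--     if not has_error_handling:
--         assumptions.append("No errors will occur during execution")
--
--     return assumptions
-- ===== SOURCE B (Python) =====
-- from typing import Dict, List, Optional
--
-- def _extract_assumptions(nodes: List[Dict]) -> List[str]:
--     """Extract implicit assumptions (single pass accumulating flags)."""
--     has_api = has_db = has_sched = has_hook = has_err = False
--     for node in nodes:
--         nt = node.get("type", "").lower()
--         has_api = has_api or "http" in nt or "api" in nt
--         has_db = has_db or "database" in nt or "postgres" in nt or "mysql" in nt
--         has_sched = has_sched or "schedule" in nt
--         has_hook = has_hook or "webhook" in nt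
--         has_err = has_err or "error" in nt or bool(node.get("continueOnFail", False))
--     out = []
--     if has_api:
--         out += ["External API is available and stable",
--                 "API authentication credentials are valid"]
--     if has_db:
--         out += ["Database connection is stable",
--                 "Database schema matches expected structure"]
--     if has_sched:
--         out.append("Workflow executes within expected time window")
--     if has_hook:
--         out += ["Webhook endpoint is publicly accessible",
--                 "Webhook payload format is consistent"]
--     if len(nodes) > 5:
--         out += ["Input data format is consistent",
--                 "Data volume is manageable"]
--     if not has_err:
--         out.append("No errors will occur during execution")
--     return out
-- ===== Notes on version B (the rewrite author's own statement) =====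
-- stated objective: alternative
-- what changed: Replaces the five independent any()-scans over the node list (plus a rebuilt node_types list) with a single loop that lower-cases each type once and accumulates five boolean flags, then emits the assumption strings from the flags.
import Mathlib
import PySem

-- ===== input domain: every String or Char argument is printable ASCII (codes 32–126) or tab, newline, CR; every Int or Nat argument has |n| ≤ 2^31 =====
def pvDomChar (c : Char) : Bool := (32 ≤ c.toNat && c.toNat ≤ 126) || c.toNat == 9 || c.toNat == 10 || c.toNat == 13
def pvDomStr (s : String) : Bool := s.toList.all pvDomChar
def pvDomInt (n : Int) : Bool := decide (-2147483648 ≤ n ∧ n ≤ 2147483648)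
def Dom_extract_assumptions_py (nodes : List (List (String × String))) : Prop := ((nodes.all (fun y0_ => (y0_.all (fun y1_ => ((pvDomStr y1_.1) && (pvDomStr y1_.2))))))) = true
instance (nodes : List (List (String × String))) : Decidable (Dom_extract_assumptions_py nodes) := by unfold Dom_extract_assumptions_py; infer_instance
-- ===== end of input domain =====

-- B differs from A by merging A's five independent any()-scans into one pass that
-- lower-cases each node type once and accumulates boolean flags (objective: alternative).
-- node.get("continueOnFail", False): values are strings here, truthy iff non-empty.

-- ===== PORT A =====
-- node.get("type", "").lower()
def pvNodeType (node : List (String × String)) : String :=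
  PySem.Str.lower ((PySem.Dict.mk node).getD "type" "")

-- truthiness of node.get("continueOnFail", False) on string values
def pvContinueOnFail (node : List (String × String)) : Bool :=
  match (PySem.Dict.mk node).get? "continueOnFail" with
  | some s => !s.toList.isEmpty
  | none => false

def extract_assumptions_py (nodes : List (List (String × String))) : List String :=
  let assumptions : List String := []
  let node_types := nodes.map (fun node => pvNodeType node)
  let assumptions := if node_types.any (fun nt => PySem.Str.isIn "http" nt || PySem.Str.isIn "api" nt) then
      assumptions ++ ["External API is available and stable"] ++ ["API authentication credentials are valid"]
    else assumptions
  let assumptions := if node_types.any (fun nt => PySem.Str.isIn "database" nt || PySem.Str.isIn "postgres" nt || PySem.Str.isIn "mysql" nt) then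
      assumptions ++ ["Database connection is stable"] ++ ["Database schema matches expected structure"]
    else assumptions
  let assumptions := if node_types.any (fun nt => PySem.Str.isIn "schedule" nt) then
      assumptions ++ ["Workflow executes within expected time window"]
    else assumptions
  let assumptions := if node_types.any (fun nt => PySem.Str.isIn "webhook" nt) then
      assumptions ++ ["Webhook endpoint is publicly accessible"] ++ ["Webhook payload format is consistent"]
    else assumptions
  let assumptions := if nodes.length > 5 then
      assumptions ++ ["Input data format is consistent"] ++ ["Data volume is manageable"]
    else assumptions
  let has_error_handling := nodes.any (fun node =>
      PySem.Str.isIn "error" (pvNodeType node) || pvContinueOnFail node)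
  let assumptions := if !has_error_handling then
      assumptions ++ ["No errors will occur during execution"]
    else assumptions
  assumptions

-- ===== PORT B =====
-- one pass over the nodes accumulating (has_api, has_db, has_sched, has_hook, has_err)
def pvFlagStep (f : Bool × Bool × Bool × Bool × Bool) (node : List (String × String)) :
    Bool × Bool × Bool × Bool × Bool :=
  let nt := PySem.Str.lower ((PySem.Dict.mk node).getD "type" "")
  (f.1 || PySem.Str.isIn "http" nt || PySem.Str.isIn "api" nt,
   f.2.1 || PySem.Str.isIn "database" nt || PySem.Str.isIn "postgres" nt || PySem.Str.isIn "mysql" nt,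
   f.2.2.1 || PySem.Str.isIn "schedule" nt,
   f.2.2.2.1 || PySem.Str.isIn "webhook" nt,
   f.2.2.2.2 || PySem.Str.isIn "error" nt ||
     (match (PySem.Dict.mk node).get? "continueOnFail" with
      | some s => !s.toList.isEmpty
      | none => false))

def extract_assumptions_py_alt (nodes : List (List (String × String))) : List String :=
  let f := nodes.foldl pvFlagStep (false, false, false, false, false)
  (if f.1 then ["External API is available and stable", "API authentication credentials are valid"] else []) ++
  (if f.2.1 then ["Database connection is stable", "Database schema matches expected structure"] else []) ++
  (if f.2.2.1 then ["Workflow executes within expected time window"] else []) ++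
  (if f.2.2.2.1 then ["Webhook endpoint is publicly accessible", "Webhook payload format is consistent"] else []) ++
  (if nodes.length > 5 then ["Input data format is consistent", "Data volume is manageable"] else []) ++
  (if !f.2.2.2.2 then ["No errors will occur during execution"] else [])

-- ===== PRECONDITION & SPEC =====
def Spec_extract_assumptions_py (nodes : List (List (String × String))) (out : List String) : Prop := out = extract_assumptions_py_alt nodes
instance (nodes : List (List (String × String))) (out : List String) : Decidable (Spec_extract_assumptions_py nodes out) := by unfold Spec_extract_assumptions_py; infer_instance

-- ===== CLAIM (what is proved, stated in full; the proofs are below) =====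
def Claim_equal_extract_assumptions_py : Prop := ∀ (nodes : List (List (String × String))), Dom_extract_assumptions_py nodes → Spec_extract_assumptions_py nodes (extract_assumptions_py nodes)

-- ===== LEMMAS AND PROOFS =====
-- the flag fold computes exactly the five any-scans of A
theorem pvFlags_eq (nodes : List (List (String × String))) (b : Bool × Bool × Bool × Bool × Bool) :
    nodes.foldl pvFlagStep b =
      (b.1 || nodes.any (fun n => PySem.Str.isIn "http" (pvNodeType n) || PySem.Str.isIn "api" (pvNodeType n)),
       b.2.1 || nodes.any (fun n => PySem.Str.isIn "database" (pvNodeType n) || PySem.Str.isIn "postgres" (pvNodeType n) || PySem.Str.isIn "mysql" (pvNodeType n)),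
       b.2.2.1 || nodes.any (fun n => PySem.Str.isIn "schedule" (pvNodeType n)),
       b.2.2.2.1 || nodes.any (fun n => PySem.Str.isIn "webhook" (pvNodeType n)),
       b.2.2.2.2 || nodes.any (fun n => PySem.Str.isIn "error" (pvNodeType n) || pvContinueOnFail n)) := by
  induction nodes generalizing b with
  | nil => simp
  | cons a l ih =>
    simp only [List.foldl_cons, List.any_cons, ih]
    simp [pvFlagStep, pvNodeType, pvContinueOnFail, Bool.or_assoc]

-- ===== VERDICT (by name: the statement is the Claim_ definition above) =====
theorem extract_assumptions_py_spec : Claim_equal_extract_assumptions_py := by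
  intro nodes _
  unfold Spec_extract_assumptions_py extract_assumptions_py extract_assumptions_py_alt
  simp only [pvFlags_eq, Bool.false_or, List.any_map, Function.comp_def]
  split_ifs <;> rfl
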